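-- pv_equiv track=rewrite | github.com/gabrielmariebrisson/master | semestre_3/Knowledge Representation/TP noté/gsat-trivial.py | select_variable_to_flip
-- ===== SOURCE A (Python) =====
-- def count_satisfied_clauses(assignment, formula):
--     return sum(1 for clause in formula if any(assignment.get(abs(lit), False) if lit > 0 else not assignment.get(abs(lit), False) for lit in clause))
--
-- def select_variable_to_flip(assignment, formula):
--     best_var = None
--     best_increase = -1
--     current_satisfied = count_satisfied_clauses(assignment, formula)
--
--     for var in assignment:
--         # Flip variable
--         assignment[var] = not assignment[var]
--         flipped_satisfied = count_satisfied_clauses(assignment, formula)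
--
--         increase = flipped_satisfied - current_satisfied
--         if increase > best_increase:
--             best_increase = increase
--             best_var = var
--
--         # Unflip variable
--         assignment[var] = not assignment[var]
--
--     return best_var
-- ===== SOURCE B (Python) =====
-- def select_variable_to_flip(assignment, formula):
--     # One pass over the formula: per-clause satisfied-literal count c and,
--     # per clause, the positive/negative occurrence counts of each variable.
--     entries = []
--     for clause in formula:
--         c = 0
--         occ = {}
--         for lit in clause:
--             v = abs(lit)
--             val = assignment.get(v, False)
--             if (val if lit > 0 else not val):
--                 c += 1
--             np_, nn = occ.get(v, (0, 0))
--             occ[v] = (np_ + 1, nn) if lit > 0 else (np_, nn + 1)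
--         for v, (np_, nn) in occ.items():
--             entries.append((v, (c, np_, nn)))
--     # Index the per-clause summaries by variable.
--     index = {}
--     for v, e in entries:
--         index.setdefault(v, []).append(e)
--     # Flip delta of a variable touches only the clauses it occurs in.
--     best_var, best_inc = None, -1
--     for var, val in assignment.items():
--         inc = 0
--         for c, np_, nn in index.get(var, []):
--             s = np_ if val else nn
--             c2 = c - 2 * s + np_ + nn
--             inc += (1 if c2 > 0 else 0) - (1 if c > 0 else 0)
--         if inc > best_inc:
--             best_var, best_inc = var, inc
--     return best_var
-- ===== Notes on version B (the rewrite author's own statement) =====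
-- stated objective: faster
-- what changed: Instead of flipping each variable and recounting every clause (A), B makes one pass over the formula computing per-clause satisfied-literal counts and per-variable occurrence counts, indexes these summaries by variable, and computes each flip's increase arithmetically over only the clauses containing that variable.
import Mathlib
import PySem

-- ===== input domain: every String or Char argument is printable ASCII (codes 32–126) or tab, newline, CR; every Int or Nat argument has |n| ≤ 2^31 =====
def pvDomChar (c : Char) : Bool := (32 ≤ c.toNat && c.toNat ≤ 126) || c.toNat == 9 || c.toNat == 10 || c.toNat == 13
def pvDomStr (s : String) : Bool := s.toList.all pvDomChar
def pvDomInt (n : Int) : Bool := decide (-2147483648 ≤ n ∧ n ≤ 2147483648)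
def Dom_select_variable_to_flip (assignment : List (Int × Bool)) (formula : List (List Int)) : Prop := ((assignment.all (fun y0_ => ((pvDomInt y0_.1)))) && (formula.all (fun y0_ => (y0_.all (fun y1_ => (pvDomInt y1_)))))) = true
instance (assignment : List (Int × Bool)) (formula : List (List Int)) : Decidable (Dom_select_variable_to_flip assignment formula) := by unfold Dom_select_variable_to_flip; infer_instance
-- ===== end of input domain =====

-- B replaces A's flip-and-recount scan (a full recount of every clause for every variable) by
-- one pass that summarises each clause (satisfied-literal count + per-variable occurrence
-- counts), indexes the summaries by variable, and computes each flip delta arithmetically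
-- from the summaries of only the clauses that variable occurs in; objective: faster.
-- A temporarily mutates and then restores its dict argument; the net side effect is none,
-- and B performs no mutation.

-- ===== PORT A =====
-- truth value of a literal: assignment.get(abs(lit), False) if lit > 0 else not assignment.get(abs(lit), False)
def pvSatLit (d : PySem.Dict Int Bool) (lit : Int) : Bool :=
  if lit > 0 then d.getD |lit| false else ! d.getD |lit| false

def count_satisfied_clauses (d : PySem.Dict Int Bool) (formula : List (List Int)) : Int :=
  -- sum(1 for clause in formula if any(... for lit in clause))
  (formula.countP (fun clause => clause.any (fun lit => pvSatLit d lit)) : Int)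

-- body of A's `for var in assignment` loop: flip, recount, update best, unflip
def pvStepA (current : Int) (formula : List (List Int))
    (st : Option Int × Int × PySem.Dict Int Bool) (var : Int) :
    Option Int × Int × PySem.Dict Int Bool :=
  let d1 := st.2.2.insert var (! st.2.2.getD var false)
  let flipped := count_satisfied_clauses d1 formula
  let increase := flipped - current
  let best := if increase > st.2.1 then (some var, increase) else (st.1, st.2.1)
  (best.1, best.2, d1.insert var (! d1.getD var false))

def select_variable_to_flip (assignment : List (Int × Bool)) (formula : List (List Int)) : Option Int :=
  let d0 : PySem.Dict Int Bool := PySem.Dict.mk assignment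
  let current := count_satisfied_clauses d0 formula
  (d0.keys.foldl (pvStepA current formula) (none, -1, d0)).1

-- ===== PORT B =====
-- one pass over a clause: (satisfied-literal count, dict var ↦ (#positive, #negative occurrences))
def pvClauseSummary (d0 : PySem.Dict Int Bool) (clause : List Int) :
    Int × PySem.Dict Int (Int × Int) :=
  clause.foldl (fun (st : Int × PySem.Dict Int (Int × Int)) lit =>
      ((if (if lit > 0 then d0.getD |lit| false else ! d0.getD |lit| false) then st.1 + 1 else st.1),
       st.2.modify |lit| (0, 0) (fun p => if lit > 0 then (p.1 + 1, p.2) else (p.1, p.2 + 1))))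
    (0, PySem.Dict.mk [])

-- flip delta contributed by one clause summary e = (c, np, nn) for a variable currently = val
def pvFlipDelta (val : Bool) (e : Int × Int × Int) : Int :=
  let s := if val then e.2.1 else e.2.2
  let c2 := e.1 - 2 * s + e.2.1 + e.2.2
  (if c2 > 0 then (1 : Int) else 0) - (if e.1 > 0 then (1 : Int) else 0)

-- body of B's `for var, val in assignment.items()` loop
def pvStepB (index : PySem.Dict Int (List (Int × Int × Int)))
    (st : Option Int × Int) (p : Int × Bool) : Option Int × Int :=
  let inc := (index.getD p.1 []).foldl (fun acc e => acc + pvFlipDelta p.2 e) 0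
  if inc > st.2 then (some p.1, inc) else st

def select_variable_to_flip_alt (assignment : List (Int × Bool)) (formula : List (List Int)) : Option Int :=
  let d0 : PySem.Dict Int Bool := PySem.Dict.mk assignment
  let entries := formula.foldl (fun (es : List (Int × Int × Int × Int)) clause =>
      let cs := pvClauseSummary d0 clause
      es ++ cs.2.items.map (fun p => (p.1, cs.1, p.2.1, p.2.2))) []
  let index := entries.foldl (fun (ix : PySem.Dict Int (List (Int × Int × Int))) p =>
      ix.modify p.1 [] (fun l => l ++ [p.2])) (PySem.Dict.mk [])
  (d0.items.foldl (pvStepB index) (none, -1)).1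

-- ===== PRECONDITION & SPEC =====
-- Pre_ requires the association list to have distinct keys: it models a Python dict, which
-- cannot hold duplicate keys, so no input reachable from Python is excluded.
def Pre_select_variable_to_flip (assignment : List (Int × Bool)) (formula : List (List Int)) : Prop :=
  (assignment.map Prod.fst).Nodup
instance (assignment : List (Int × Bool)) (formula : List (List Int)) : Decidable (Pre_select_variable_to_flip assignment formula) := by unfold Pre_select_variable_to_flip; infer_instance

def pvWitness_select_variable_to_flip : (List (Int × Bool)) × List (List Int) :=
  ([(1, true), (2, false)], [[1, -2], [-1, 2]])

def Spec_select_variable_to_flip (assignment : List (Int × Bool)) (formula : List (List Int)) (out : Option Int) : Prop := out = select_variable_to_flip_alt assignment formula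
instance (assignment : List (Int × Bool)) (formula : List (List Int)) (out : Option Int) : Decidable (Spec_select_variable_to_flip assignment formula out) := by unfold Spec_select_variable_to_flip; infer_instance

-- ===== CLAIM (what is proved, stated in full; the proofs are below) =====
def Claim_equal_select_variable_to_flip : Prop := ∀ (assignment : List (Int × Bool)) (formula : List (List Int)), Dom_select_variable_to_flip assignment formula → Pre_select_variable_to_flip assignment formula → Spec_select_variable_to_flip assignment formula (select_variable_to_flip assignment formula)

-- ===== LEMMAS AND PROOFS =====

-- positive / negative occurrence tests of a variable in a clause
def pvPos (v lit : Int) : Bool := decide (lit > 0) && (|lit| == v)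
def pvNeg (v lit : Int) : Bool := !decide (lit > 0) && (|lit| == v)

-- A's flip increase for one variable, with the dict unchanged (A restores it)
def pvIncA (d0 : PySem.Dict Int Bool) (formula : List (List Int)) (current : Int) (v : Int) : Int :=
  count_satisfied_clauses (d0.insert v (! d0.getD v false)) formula - current

lemma pv_countP_flip_arith : ∀ (cl : List Int) (p q : Int → Bool),
    ((cl.countP (fun x => if q x then !p x else p x) : Int)) =
      (cl.countP p : Int) - 2 * (cl.countP (fun x => p x && q x) : Int) + (cl.countP q : Int) := by
  intro cl p q
  induction cl with
  | nil => simp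
  | cons a t ih =>
    simp only [List.countP_cons]
    push_cast
    cases hp : p a <;> cases hq : q a <;> simp [hp, hq] <;> omega
lemma pv_sum_map_flatMap {α β : Type} (F : List α) (g : α → List β) (h : β → Int) :
    ((F.flatMap g).map h).sum = (F.map (fun x => ((g x).map h).sum)).sum := by
  induction F with
  | nil => simp
  | cons a t ih => simp [List.flatMap_cons, ih]
lemma pv_countP_sub_eq_sum (F : List (List Int)) (p1 p0 : Int → Bool) :
    (F.countP (fun cl => cl.any p1) : Int) - (F.countP (fun cl => cl.any p0) : Int) =
      (F.map (fun cl => (if cl.any p1 then (1 : Int) else 0) - (if cl.any p0 then (1 : Int) else 0))).sum := by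
  induction F with
  | nil => simp
  | cons a t ih =>
    simp only [List.countP_cons, List.map_cons, List.sum_cons]
    push_cast
    cases h1 : a.any p1 <;> cases h0 : a.any p0 <;>
      simp [h1, h0, List.any_eq_true] at ih ⊢ <;> omega

lemma pv_satLit_insert (d0 : PySem.Dict Int Bool) (v : Int) (val : Bool) (lit : Int)
    (hval : d0.getD v false = val) :
    pvSatLit (d0.insert v (!val)) lit =
      if |lit| = v then ! pvSatLit d0 lit else pvSatLit d0 lit := by
  unfold pvSatLit
  rw [show (d0.insert v (!val)).getD |lit| false = if |lit| = v then (!val) else d0.getD |lit| false from PySem.Dict.getD_insert d0 v |lit| (!val) false]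
  by_cases h : |lit| = v <;> by_cases hl : lit > 0 <;> simp [h, hl, hval]

lemma pv_countP_q_split : ∀ (cl : List Int) (v : Int),
    (cl.countP (fun lit => |lit| == v)) = cl.countP (pvPos v) + cl.countP (pvNeg v) := by
  intro cl v
  induction cl with
  | nil => simp
  | cons a t ih =>
    simp only [List.countP_cons, pvPos, pvNeg]
    by_cases h : |a| = v <;> by_cases hl : a > 0 <;> simp [h, hl, pvPos, pvNeg] at * <;> omega

lemma pv_summary_getD : ∀ (cl : List Int) (d : PySem.Dict Int (Int × Int)) (w : Int),
    ((cl.foldl (fun d lit =>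
        d.modify |lit| (0, 0) (fun p => if lit > 0 then (p.1 + 1, p.2) else (p.1, p.2 + 1))) d).getD w (0, 0)) =
      ((d.getD w (0, 0)).1 + (cl.countP (pvPos w) : Int),
       (d.getD w (0, 0)).2 + (cl.countP (pvNeg w) : Int)) := by
  intro cl
  induction cl with
  | nil => simp
  | cons a t ih =>
    intro d w
    simp only [List.foldl_cons, ih, List.countP_cons]
    rw [PySem.Dict.getD_modify]
    by_cases h : w = |a| <;> by_cases hl : a > 0 <;>
      · simp [h, hl, pvPos, pvNeg]
        push_cast
        first | (constructor <;> omega) | omega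

lemma pv_summary_eq (d0 : PySem.Dict Int Bool) (cl : List Int) :
    pvClauseSummary d0 cl =
      (cl.foldl (fun acc lit => if pvSatLit d0 lit then acc + 1 else acc) 0,
       cl.foldl (fun d lit =>
         d.modify |lit| (0, 0) (fun p => if lit > 0 then (p.1 + 1, p.2) else (p.1, p.2 + 1))) (PySem.Dict.mk [])) := by
  unfold pvClauseSummary pvSatLit
  exact PySem.List.foldl_prod_mk
    (fun (acc : Int) lit => if (if lit > 0 then d0.getD |lit| false else ! d0.getD |lit| false) then acc + 1 else acc)
    (fun (d : PySem.Dict Int (Int × Int)) lit => d.modify |lit| (0, 0) (fun p => if lit > 0 then (p.1 + 1, p.2) else (p.1, p.2 + 1))) cl (0 : Int) (PySem.Dict.mk [])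

lemma pv_summary_fst (d0 : PySem.Dict Int Bool) (cl : List Int) :
    (pvClauseSummary d0 cl).1 = (cl.countP (fun lit => pvSatLit d0 lit) : Int) := by
  rw [pv_summary_eq]
  simpa using PySem.List.foldl_if_add_one (fun lit => pvSatLit d0 lit) cl 0

lemma pv_summary_keys (d0 : PySem.Dict Int Bool) (cl : List Int) :
    (pvClauseSummary d0 cl).2.keys = PySem.Set.ofList (cl.map (fun lit => |lit|)) := by
  rw [pv_summary_eq]
  dsimp only
  have h := PySem.Dict.keys_foldl_modify_key cl (fun lit : Int => |lit|) ((0,0) : Int × Int)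
      (fun _ lit p => if lit > 0 then (p.1 + 1, p.2) else (p.1, p.2 + 1)) (PySem.Dict.mk [])
  simp only [PySem.Dict.keys_mk, List.map_nil, PySem.Set.update_nil_left] at h
  exact h

lemma pv_map_overwrite_id : ∀ (l : List (Int × Bool)) (v : Int) (val : Bool),
    (l.map Prod.fst).Nodup → l.find? (fun p => p.1 == v) = some (v, val) →
    l.map (fun p => if p.1 == v then (v, val) else p) = l := by
  intro l v val hnd hf
  induction l with
  | nil => simp at hf
  | cons a t ih =>
    simp only [List.map_cons, List.nodup_cons, List.mem_map] at hnd
    rw [List.find?_cons] at hf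
    by_cases h : a.1 = v
    · have hb : (a.1 == v) = true := by simp [h]
      simp only [hb] at hf
      have ha : a = (v, val) := by exact Option.some.inj hf
      have ht : t.map (fun p => if p.1 == v then (v, val) else p) = t := by
        have hcg := List.map_congr_left (l := t)
            (f := fun p : Int × Bool => if p.1 == v then (v, val) else p) (g := id) ?_
        · simpa using hcg
        · intro p hp
          have hne : ¬ (p.1 = v) := fun hpv => hnd.1 ⟨p, hp, by rw [hpv, ← h]⟩
          simp [hne]
      rw [List.map_cons, ht]
      simp only [hb, if_true, ← ha]
    · have hb : (a.1 == v) = false := by simp [h]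
      simp only [hb] at hf
      have ht := ih hnd.2 hf
      simp only [List.map_cons, hb, Bool.false_eq_true, if_false, ht]

lemma pv_insert_restore (d : PySem.Dict Int Bool) (v : Int) (val b : Bool)
    (hnd : d.keys.Nodup) (h : d.get? v = some val) :
    (d.insert v b).insert v val = d := by
  have hc : d.contains v = true := by
    rw [PySem.Dict.contains_eq_isSome_get?, h]; rfl
  have hc1 : (d.insert v b).contains v = true := PySem.Dict.contains_insert_self d v b
  apply PySem.Dict.ext
  rw [PySem.Dict.items_insert_of_contains _ _ hc1, PySem.Dict.items_insert_of_contains _ _ hc]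
  rw [List.map_map]
  have hfind : d.items.find? (fun p => p.1 == v) = some (v, val) := by
    have h' := h
    unfold PySem.Dict.get? at h'
    rcases hf : d.items.find? (fun p => p.1 == v) with _ | q
    · rw [hf] at h'; simp at h'
    · rw [hf] at h'
      simp only [Option.map_some, Option.some.injEq] at h'
      have hq1 : q.1 = v := by simpa using List.find?_some hf
      rw [hf]
      refine congrArg some ?_
      apply Prod.ext
      · exact hq1
      · exact h'
  have hmap := pv_map_overwrite_id d.items v val hnd hfind
  rw [show ((fun (p : Int × Bool) => if (p.1 == v) = true then (v, val) else p) ∘ fun p => if (p.1 == v) = true then (v, b) else p)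
      = (fun (p : Int × Bool) => if (p.1 == v) = true then (v, val) else p) from ?_]
  · exact hmap
  · funext p
    by_cases hp : p.1 = v <;> simp [hp]

lemma pv_stepA_eq (current : Int) (formula : List (List Int)) (d : PySem.Dict Int Bool)
    (b : Option Int × Int) (v : Int) (hnd : d.keys.Nodup) (hv : (d.get? v).isSome) :
    pvStepA current formula (b.1, b.2, d) v =
      ((if pvIncA d formula current v > b.2 then (some v, pvIncA d formula current v) else b).1,
       (if pvIncA d formula current v > b.2 then (some v, pvIncA d formula current v) else b).2, d) := by
  obtain ⟨val, hval⟩ : ∃ val, d.get? v = some val := Option.isSome_iff_exists.mp hv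
  have hgd : d.getD v false = val := PySem.Dict.getD_of_get?_eq_some d false hval
  unfold pvStepA pvIncA
  dsimp only
  have h1 : (d.insert v (! d.getD v false)).getD v false = ! d.getD v false :=
    PySem.Dict.getD_insert_self d v (! d.getD v false) false
  rw [h1, Bool.not_not, hgd]
  rw [pv_insert_restore d v val (!val) hnd hval]

lemma pv_foldA_collapse (current : Int) (formula : List (List Int)) :
    ∀ (l : List Int) (d : PySem.Dict Int Bool) (b : Option Int × Int),
    d.keys.Nodup → (∀ v ∈ l, (d.get? v).isSome) →
    (l.foldl (pvStepA current formula) (b.1, b.2, d)).1 =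
      (l.foldl (fun st v =>
        if pvIncA d formula current v > st.2 then (some v, pvIncA d formula current v) else st) b).1 := by
  intro l
  induction l with
  | nil => intro d b _ _; rfl
  | cons v t ih =>
    intro d b hnd hall
    rw [List.foldl_cons, List.foldl_cons]
    rw [pv_stepA_eq current formula d b v hnd (hall v (List.mem_cons_self))]
    exact ih d _ hnd (fun w hw => hall w (List.mem_cons_of_mem v hw))

lemma pv_clause_delta_zero (d0 : PySem.Dict Int Bool) (cl : List Int) (v : Int) (val : Bool)
    (hval : d0.getD v false = val) (hmem : v ∉ cl.map (fun lit => |lit|)) :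
    cl.any (pvSatLit (d0.insert v (!val))) = cl.any (pvSatLit d0) := by
  apply PySem.List.any_congr_mem
  intro lit hlit
  rw [pv_satLit_insert d0 v val lit hval]
  have : ¬ (|lit| = v) := fun h => hmem (by exact List.mem_map.mpr ⟨lit, hlit, h⟩)
  simp [this]

lemma pv_s_split (d0 : PySem.Dict Int Bool) (cl : List Int) (v : Int) (val : Bool)
    (hval : d0.getD v false = val) :
    cl.countP (fun lit => pvSatLit d0 lit && (|lit| == v)) =
      if val then cl.countP (pvPos v) else cl.countP (pvNeg v) := by
  by_cases hv : val = true
  · subst hv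
    rw [if_pos rfl]
    apply List.countP_congr
    intro lit _
    unfold pvSatLit pvPos
    by_cases h : |lit| = v <;> by_cases hl : lit > 0 <;> simp [h, hl] <;> first | exact hval | (intro hh; rw [h, hval] at hh; simp_all) | simp_all [hval]
  · have hv' : val = false := by simpa using hv
    subst hv'
    rw [if_neg (by simp)]
    apply List.countP_congr
    intro lit _
    unfold pvSatLit pvNeg
    by_cases h : |lit| = v <;> by_cases hl : lit > 0 <;> simp [h, hl] <;> first | exact hval | (intro hh; rw [h, hval] at hh; simp_all) | simp_all [hval]

lemma pv_countP_flip (d0 : PySem.Dict Int Bool) (cl : List Int) (v : Int) (val : Bool)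
    (hval : d0.getD v false = val) :
    (cl.countP (pvSatLit (d0.insert v (!val))) : Int) =
      (cl.countP (pvSatLit d0) : Int)
      - 2 * (if val then (cl.countP (pvPos v) : Int) else (cl.countP (pvNeg v) : Int))
      + (cl.countP (pvPos v) : Int) + (cl.countP (pvNeg v) : Int) := by
  have h1 : cl.countP (pvSatLit (d0.insert v (!val))) =
      cl.countP (fun lit => if (|lit| == v) then ! pvSatLit d0 lit else pvSatLit d0 lit) := by
    apply List.countP_congr
    intro lit _
    rw [pv_satLit_insert d0 v val lit hval]
    by_cases h : |lit| = v <;> simp [h]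
  rw [h1, pv_countP_flip_arith cl (pvSatLit d0) (fun lit => |lit| == v)]
  rw [pv_s_split d0 cl v val hval, pv_countP_q_split cl v]
  by_cases hv : val = true <;> simp [hv] <;> push_cast <;> ring

lemma pv_clause_delta (d0 : PySem.Dict Int Bool) (cl : List Int) (v : Int) (val : Bool)
    (hval : d0.getD v false = val) :
    (if cl.any (pvSatLit (d0.insert v (!val))) then (1 : Int) else 0) -
      (if cl.any (pvSatLit d0) then (1 : Int) else 0) =
    pvFlipDelta val ((cl.countP (fun lit => pvSatLit d0 lit) : Int),
      (cl.countP (pvPos v) : Int), (cl.countP (pvNeg v) : Int)) := by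
  unfold pvFlipDelta
  dsimp only
  have hany : ∀ (p : Int → Bool), cl.any p = decide ((cl.countP p : Int) > 0) := by
    intro p
    rcases h : cl.any p
    · have h0 : cl.countP p = 0 := by
        rw [List.countP_eq_zero]
        intro a ha
        have := List.any_eq_false.mp h a ha
        simp [this]
      simp [h0]
    · obtain ⟨x, hx, hpx⟩ := List.any_eq_true.mp h
      have hpos : 0 < cl.countP p := List.countP_pos_iff.mpr ⟨x, hx, hpx⟩
      have hpos' : ((cl.countP p : Int) > 0) := by exact_mod_cast hpos
      simp [hpos']
      exact ⟨x, hx, hpx⟩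
  rw [hany (pvSatLit (d0.insert v (!val))), hany (pvSatLit d0)]
  have hc2 := pv_countP_flip d0 cl v val hval
  rw [← hc2]
  by_cases h1 : ((cl.countP (pvSatLit (d0.insert v (!val))) : Int) > 0) <;>
    by_cases h0 : ((cl.countP (fun lit => pvSatLit d0 lit) : Int) > 0) <;>
    simp [h1, h0]

lemma pv_summary_getD' (d0 : PySem.Dict Int Bool) (cl : List Int) (w : Int) :
    (pvClauseSummary d0 cl).2.getD w (0, 0) =
      ((cl.countP (pvPos w) : Int), (cl.countP (pvNeg w) : Int)) := by
  rw [pv_summary_eq]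
  dsimp only
  rw [pv_summary_getD cl (PySem.Dict.mk []) w]
  simp [PySem.Dict.getD, PySem.Dict.get?]

lemma pv_entries_filter (d0 : PySem.Dict Int Bool) (cl : List Int) (v : Int) :
    (((pvClauseSummary d0 cl).2.items.map
        (fun p => ((p.1, (pvClauseSummary d0 cl).1, p.2.1, p.2.2) : Int × Int × Int × Int))).filter
      (fun e => e.1 == v)) =
    if v ∈ cl.map (fun lit => |lit|) then
      [(v, (pvClauseSummary d0 cl).1, (cl.countP (pvPos v) : Int), (cl.countP (pvNeg v) : Int))]
    else [] := by
  have hkeys := pv_summary_keys d0 cl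
  have hnd : (pvClauseSummary d0 cl).2.keys.Nodup := by
    rw [hkeys]; exact PySem.Set.nodup_ofList _
  rw [PySem.Dict.items_eq_map_keys _ hnd ((0, 0) : Int × Int), List.map_map, List.filter_map]
  have hpred : ((fun (e : Int × Int × Int × Int) => e.1 == v) ∘
      ((fun p => ((p.1, (pvClauseSummary d0 cl).1, p.2.1, p.2.2) : Int × Int × Int × Int)) ∘
       (fun k => (k, (pvClauseSummary d0 cl).2.getD k (0, 0))))) = fun (k : Int) => k == v := by
    funext k; rfl
  rw [hpred]
  by_cases hmem : v ∈ cl.map (fun lit => |lit|)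
  · have hv : v ∈ (pvClauseSummary d0 cl).2.keys := by
      rw [hkeys]; exact (PySem.Set.mem_ofList _ _).mpr hmem
    have hcount : List.count v (pvClauseSummary d0 cl).2.keys = 1 :=
      List.count_eq_one_of_mem hnd hv
    have hfe : (pvClauseSummary d0 cl).2.keys.filter (fun k => k == v) = [v] := by
      have heq := List.filter_eq (l := (pvClauseSummary d0 cl).2.keys) v
      rw [show (fun (k : Int) => k == v) = (fun k => decide (k = v)) from by funext k; rfl, heq,
        hcount, List.replicate_one]
    rw [hfe, if_pos hmem]
    simp [pv_summary_getD' d0 cl v]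
  · have hv : v ∉ (pvClauseSummary d0 cl).2.keys := by
      rw [hkeys]; exact fun h => hmem ((PySem.Set.mem_ofList _ _).mp h)
    have hfe : (pvClauseSummary d0 cl).2.keys.filter (fun k => k == v) = [] := by
      rw [List.filter_eq_nil_iff]
      intro k hk
      simp only [beq_iff_eq]
      intro hkv; exact hv (hkv ▸ hk)
    rw [hfe, if_neg hmem]
    rfl

lemma pv_inc_eq (d0 : PySem.Dict Int Bool) (formula : List (List Int)) (v : Int) (val : Bool)
    (hget : d0.get? v = some val) :
    ((((formula.foldl (fun (es : List (Int × Int × Int × Int)) clause =>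
          let cs := pvClauseSummary d0 clause
          es ++ cs.2.items.map (fun p => (p.1, cs.1, p.2.1, p.2.2))) []).foldl
        (fun (ix : PySem.Dict Int (List (Int × Int × Int))) p =>
          ix.modify p.1 [] (fun l => l ++ [p.2])) (PySem.Dict.mk [])).getD v []).foldl
      (fun acc e => acc + pvFlipDelta val e) 0) =
    pvIncA d0 formula (count_satisfied_clauses d0 formula) v := by
  have hval : d0.getD v false = val := PySem.Dict.getD_of_get?_eq_some d0 false hget
  -- entries as a flatMap
  rw [PySem.List.foldl_append_eq_flatMap
    (fun clause => (pvClauseSummary d0 clause).2.items.map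
      (fun p => ((p.1, (pvClauseSummary d0 clause).1, p.2.1, p.2.2) : Int × Int × Int × Int)))
    formula []]
  rw [List.nil_append]
  -- the index lookup is the filtered entry list
  rw [PySem.Dict.getD_foldl_modify_append _ (PySem.Dict.mk []) v]
  rw [show (PySem.Dict.mk ([] : List (Int × List (Int × Int × Int)))).getD v [] = [] from rfl,
    List.nil_append]
  -- the inner loop is a sum
  rw [PySem.List.foldl_add _ (fun e => pvFlipDelta val e) 0]
  rw [zero_add]
  -- push filter and map inside the flatMap, clause by clause
  rw [List.filter_flatMap, List.map_flatMap, pv_sum_map_flatMap]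
  -- A's side: difference of the two counts, clause by clause
  unfold pvIncA count_satisfied_clauses
  rw [hval, pv_countP_sub_eq_sum formula (pvSatLit (d0.insert v (!val))) (fun lit => pvSatLit d0 lit)]
  -- match the two per-clause terms
  congr 1
  apply List.map_congr_left
  intro cl _
  rw [pv_entries_filter d0 cl v]
  by_cases hmem : v ∈ cl.map (fun lit => |lit|)
  · rw [if_pos hmem]
    rw [pv_clause_delta d0 cl v val hval]
    simp [pv_summary_fst]
  · rw [if_neg hmem]
    rw [pv_clause_delta_zero d0 cl v val hval hmem]
    simp

-- ===== VERDICT (by name: the statement is the Claim_ definition above) =====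
theorem select_variable_to_flip_spec : Claim_equal_select_variable_to_flip := by
  intro assignment formula _ hpre
  unfold Pre_select_variable_to_flip at hpre
  unfold Spec_select_variable_to_flip
  unfold select_variable_to_flip select_variable_to_flip_alt
  dsimp only
  set d0 : PySem.Dict Int Bool := PySem.Dict.mk assignment with hd0
  set current := count_satisfied_clauses d0 formula with hcur
  have hnd : d0.keys.Nodup := by
    rw [hd0, PySem.Dict.keys_mk]
    exact hpre
  have hall : ∀ v ∈ d0.keys, (d0.get? v).isSome := by
    intro v hv
    rcases h : d0.get? v with _ | w
    · exact absurd ((PySem.Dict.get?_eq_none_iff_not_mem_keys d0 v).mp h) (by simpa using hv)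
    · rfl
  rw [show ((none, -1, d0) : Option Int × Int × PySem.Dict Int Bool) = ((none, -1).1, (none, -1).2, d0) from rfl]
  rw [pv_foldA_collapse current formula d0.keys d0 (none, -1) hnd hall]
  have hkeys : d0.keys = d0.items.map (fun p => p.1) := rfl
  rw [hkeys, List.foldl_map]
  apply congrArg
  apply PySem.List.foldl_congr_mem
  intro st p hp
  have hget : d0.get? p.1 = some p.2 := PySem.Dict.get?_of_mem_items d0 hp hnd
  unfold pvStepB
  dsimp only
  rw [pv_inc_eq d0 formula p.1 p.2 hget]
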